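-- pv_equiv track=rewrite | github.com/Evaporatey/MT-Data-Analysis-GUI | MtDy.py | _get_segment_length_at_index
-- ===== SOURCE A (Python) =====
-- def _get_segment_length_at_index(states, index):
--     """获取指定索引处状态片段的长度"""
--     if index < 0 or index >= len(states):
--         return 0
--
--     current_state = states[index]
--
--     # 向前找到片段开始
--     start = index
--     while start > 0 and states[start - 1] == current_state:
--         start -= 1
--
--     # 向后找到片段结束
--     end = index
--     while end < len(states) - 1 and states[end + 1] == current_state:
--         end += 1
--
--     return end - start + 1
-- ===== SOURCE B (Python) =====
-- def _get_segment_length_at_index(states, index):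
--     """Single left-to-right pass over run boundaries instead of local expansion."""
--     if index < 0 or index >= len(states):
--         return 0
--     run_start = 0
--     for i in range(1, len(states) + 1):
--         if i == len(states) or states[i] != states[i - 1]:
--             if index < i:
--                 return i - run_start
--             run_start = i
--     return 0
-- ===== Notes on version B (the rewrite author's own statement) =====
-- stated objective: alternative
-- what changed: Replaces A's bidirectional local expansion around index with a single left-to-right pass over run boundaries of the whole list, returning the length of the run whose span contains index.
import Mathlib
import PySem

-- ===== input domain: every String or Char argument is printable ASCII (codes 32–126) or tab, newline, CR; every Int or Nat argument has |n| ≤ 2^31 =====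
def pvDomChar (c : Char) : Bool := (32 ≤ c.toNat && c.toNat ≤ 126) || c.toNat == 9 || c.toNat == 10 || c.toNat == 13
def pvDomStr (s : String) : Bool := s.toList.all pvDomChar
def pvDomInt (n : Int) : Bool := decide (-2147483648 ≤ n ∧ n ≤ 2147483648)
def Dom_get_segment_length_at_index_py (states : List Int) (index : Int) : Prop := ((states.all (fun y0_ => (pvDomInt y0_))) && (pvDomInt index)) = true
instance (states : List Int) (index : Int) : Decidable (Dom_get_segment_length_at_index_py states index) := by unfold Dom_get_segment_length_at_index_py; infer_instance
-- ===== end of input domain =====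

-- B replaces A's bidirectional local expansion around index with a single left-to-right
-- pass over run boundaries of the whole list (alternative decomposition, same cost class).


-- ===== PORT A =====
-- while start > 0 and states[start-1] == current_state: start -= 1
-- (all accesses are in range inside the guarded branch, so plain getD is exact)
def pvFindStart (states : List Int) (cur : Int) : Nat → Nat
  | 0 => 0
  | s + 1 => if states.getD s 0 = cur then pvFindStart states cur s else s + 1

-- while end < len(states) - 1 and states[end+1] == current_state: end += 1
def pvFindEnd (states : List Int) (cur : Int) (e : Nat) : Nat :=
  if _h : e + 1 < states.length then
    if states.getD (e + 1) 0 = cur then pvFindEnd states cur (e + 1) else e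
  else e
termination_by states.length - e

def get_segment_length_at_index_py (states : List Int) (index : Int) : Int :=
  if index < 0 ∨ (states.length : Int) ≤ index then 0
  else
    let i := index.toNat
    let cur := states.getD i 0
    ((pvFindEnd states cur i : Int) - (pvFindStart states cur i : Int)) + 1

-- ===== PORT B =====
-- for i in range(1, len(states)+1): boundary test, return/advance run_start
def pvBLoop (states : List Int) (index : Int) (runStart i : Nat) : Int :=
  if _h : i ≤ states.length then
    if i = states.length ∨ ¬ states.getD i 0 = states.getD (i - 1) 0 then
      if index < (i : Int) then (i : Int) - (runStart : Int)
      else pvBLoop states index i (i + 1)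
    else pvBLoop states index runStart (i + 1)
  else 0
termination_by states.length + 1 - i

def get_segment_length_at_index_py_alt (states : List Int) (index : Int) : Int :=
  if index < 0 ∨ (states.length : Int) ≤ index then 0
  else pvBLoop states index 0 1

-- ===== PRECONDITION & SPEC =====
def Spec_get_segment_length_at_index_py (states : List Int) (index : Int) (out : Int) : Prop := out = get_segment_length_at_index_py_alt states index
instance (states : List Int) (index : Int) (out : Int) : Decidable (Spec_get_segment_length_at_index_py states index out) := by unfold Spec_get_segment_length_at_index_py; infer_instance

-- ===== CLAIM (what is proved, stated in full; the proofs are below) =====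
def Claim_equal_get_segment_length_at_index_py : Prop := ∀ (states : List Int) (index : Int), Dom_get_segment_length_at_index_py states index → Spec_get_segment_length_at_index_py states index (get_segment_length_at_index_py states index)

-- ===== LEMMAS AND PROOFS =====

theorem findStart_spec (states : List Int) (cur : Int) :
    ∀ idx : Nat, states.getD idx 0 = cur →
      pvFindStart states cur idx ≤ idx ∧
      (∀ k, pvFindStart states cur idx ≤ k → k ≤ idx → states.getD k 0 = cur) ∧
      (pvFindStart states cur idx = 0 ∨ states.getD (pvFindStart states cur idx - 1) 0 ≠ cur) := by
  intro idx
  induction idx with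
  | zero =>
      intro hcur
      refine ⟨le_refl _, ?_, Or.inl rfl⟩
      intro k hk1 hk2
      have : k = 0 := Nat.le_zero.mp hk2
      simpa [this] using hcur
  | succ s ih =>
      intro hcur
      by_cases h : states.getD s 0 = cur
      · have ihr := ih h
        simp only [pvFindStart, if_pos h]
        refine ⟨Nat.le_succ_of_le ihr.1, ?_, ihr.2.2⟩
        intro k hk1 hk2
        rcases Nat.lt_or_ge k (s + 1) with hlt | hge
        · exact ihr.2.1 k hk1 (Nat.lt_succ_iff.mp hlt)
        · have : k = s + 1 := le_antisymm hk2 hge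
          simpa [this] using hcur
      · simp only [pvFindStart, if_neg h]
        refine ⟨le_refl _, ?_, Or.inr (by simpa using h)⟩
        intro k hk1 hk2
        have : k = s + 1 := le_antisymm hk2 hk1
        simpa [this] using hcur

theorem findEnd_spec (states : List Int) (cur : Int) :
    ∀ e : Nat, e < states.length → states.getD e 0 = cur →
      e ≤ pvFindEnd states cur e ∧
      pvFindEnd states cur e < states.length ∧
      (∀ k, e ≤ k → k ≤ pvFindEnd states cur e → states.getD k 0 = cur) ∧
      (pvFindEnd states cur e + 1 = states.length ∨ states.getD (pvFindEnd states cur e + 1) 0 ≠ cur) := by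
  intro e
  induction e using pvFindEnd.induct states cur with
  | case1 e h hcur ih =>
      intro he hce
      have ihr := ih (by omega) hcur
      rw [pvFindEnd, dif_pos h, if_pos hcur]
      refine ⟨Nat.le_trans (Nat.le_succ e) ihr.1, ihr.2.1, ?_, ihr.2.2.2⟩
      intro k hk1 hk2
      rcases Nat.eq_or_lt_of_le hk1 with heq | hlt
      · simpa [← heq] using hce
      · exact ihr.2.2.1 k hlt hk2
  | case2 e h hcur =>
      intro he hce
      rw [pvFindEnd, dif_pos h, if_neg hcur]
      refine ⟨le_refl _, by omega, ?_, Or.inr hcur⟩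
      intro k hk1 hk2
      have : k = e := le_antisymm hk2 hk1
      simpa [this] using hce
  | case3 e h =>
      intro he hce
      rw [pvFindEnd, dif_neg h]
      refine ⟨le_refl _, he, ?_, Or.inl (by omega)⟩
      intro k hk1 hk2
      have : k = e := le_antisymm hk2 hk1
      simpa [this] using hce

theorem bloop_spec (states : List Int) (idx : Nat) (hidx : idx < states.length)
    (cur : Int) (hcur : states.getD idx 0 = cur)
    (s0 e0 : Nat)
    (hs0 : s0 ≤ idx) (hie : idx ≤ e0) (he0 : e0 < states.length)
    (hall : ∀ k, s0 ≤ k → k ≤ e0 → states.getD k 0 = cur)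
    (hleft : s0 = 0 ∨ states.getD (s0 - 1) 0 ≠ cur)
    (hright : e0 + 1 = states.length ∨ states.getD (e0 + 1) 0 ≠ cur) :
    ∀ runStart i : Nat, 1 ≤ i → i ≤ e0 + 1 → runStart < i → runStart ≤ idx →
      (∀ k, runStart < k → k < i → states.getD k 0 = states.getD (k - 1) 0) →
      (runStart = 0 ∨ ¬ states.getD runStart 0 = states.getD (runStart - 1) 0) →
      pvBLoop states (idx : Int) runStart i = (e0 : Int) - (s0 : Int) + 1 := by
  intro runStart i
  induction runStart, i using pvBLoop.induct states (idx : Int) with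
  | case1 runStart i hilen hb hret =>
      intro h1 hie1 hrsi hrsidx hnob hbnd
      have hidxi : idx < i := by exact_mod_cast hret
      have hieq : i = e0 + 1 := by
        by_contra hne
        have hle : i ≤ e0 := by omega
        have h1' : states.getD i 0 = cur := hall i (by omega) hle
        have h2' : states.getD (i - 1) 0 = cur := hall (i - 1) (by omega) (by omega)
        rcases hb with hb | hb
        · omega
        · exact hb (h1'.trans h2'.symm)
      have hrunall : ∀ k, runStart ≤ k → k < i → states.getD k 0 = states.getD runStart 0 := by
        intro k hk1 hk2
        induction k with
        | zero => have : runStart = 0 := Nat.le_zero.mp hk1; simp [this]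
        | succ m ihm =>
            rcases Nat.eq_or_lt_of_le hk1 with heq | hlt
            · simp [← heq]
            · have := hnob (m + 1) hlt hk2
              simpa using this.trans (ihm (by omega) (by omega))
      have hrcur : states.getD runStart 0 = cur := by
        have := hrunall idx hrsidx hidxi
        rw [hcur] at this; exact this.symm
      have hrs_eq : runStart = s0 := by
        by_contra hne
        rcases Nat.lt_or_ge runStart s0 with hlt | hge
        · have hs0pos : 0 < s0 := by omega
          have : states.getD (s0 - 1) 0 = cur := by
            have := hrunall (s0 - 1) (by omega) (by omega)
            rw [hrcur] at this; exact this
          rcases hleft with h' | h' <;> [omega; exact h' this]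
        · have hlt : s0 < runStart := by omega
          have hrspos : 0 < runStart := by omega
          have : states.getD (runStart - 1) 0 = cur := hall (runStart - 1) (by omega) (by omega)
          rcases hbnd with h' | h'
          · omega
          · exact h' (hrcur.trans this.symm)
      unfold pvBLoop
      rw [dif_pos hilen, if_pos hb, if_pos hret, hieq, hrs_eq]
      push_cast; ring
  | case2 runStart i hilen hb hret ih =>
      intro h1 hie1 hrsi hrsidx hnob hbnd
      have hidxi : i ≤ idx := by
        have : ¬ ((idx : Int) < (i : Int)) := hret
        omega
      have hbnd' : ¬ states.getD i 0 = states.getD (i - 1) 0 := by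
        rcases hb with hb | hb
        · omega
        · exact hb
      unfold pvBLoop
      rw [dif_pos hilen, if_pos hb, if_neg hret]
      exact ih (by omega) (by omega) (by omega) hidxi
        (by intro k hk1 hk2; omega) (Or.inr hbnd')
  | case3 runStart i hilen hb ih =>
      intro h1 hie1 hrsi hrsidx hnob hbnd
      push Not at hb
      have hi_lt : i ≤ e0 := by
        by_contra hgt
        have hieq : i = e0 + 1 := by omega
        rcases hright with h' | h'
        · exact hb.1 (by omega)
        · have h2 : states.getD e0 0 = cur := hall e0 (by omega) (le_refl _)
          have h3 : states.getD (e0 + 1) 0 = states.getD e0 0 := by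
            have := hb.2; rw [hieq] at this; simpa using this
          exact h' (h3.trans h2)
      unfold pvBLoop
      rw [dif_pos hilen, if_neg (by push Not; exact ⟨hb.1, hb.2⟩)]
      exact ih (by omega) (by omega) (by omega) hrsidx
        (by intro k hk1 hk2
            rcases Nat.lt_or_ge k i with hlt | hge
            · exact hnob k hk1 hlt
            · have : k = i := by omega
              simpa [this] using hb.2)
        hbnd
  | case4 runStart i hilen =>
      intro h1 hie1 hrsi hrsidx hnob hbnd
      omega

-- ===== VERDICT (by name: the statement is the Claim_ definition above) =====
theorem get_segment_length_at_index_py_spec : Claim_equal_get_segment_length_at_index_py := by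
  unfold Claim_equal_get_segment_length_at_index_py Spec_get_segment_length_at_index_py
  intro states index _
  unfold get_segment_length_at_index_py get_segment_length_at_index_py_alt
  by_cases h : index < 0 ∨ (states.length : Int) ≤ index
  · rw [if_pos h, if_pos h]
  · rw [if_neg h, if_neg h]
    push Not at h
    have hidx : index.toNat < states.length := by omega
    have hidxval : (index.toNat : Int) = index := Int.toNat_of_nonneg h.1
    set idx := index.toNat with hidef
    set cur := states.getD idx 0 with hcdef
    have hS := findStart_spec states cur idx rfl
    have hE := findEnd_spec states cur idx hidx rfl
    set s0 := pvFindStart states cur idx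
    set e0 := pvFindEnd states cur idx
    have hall : ∀ k, s0 ≤ k → k ≤ e0 → states.getD k 0 = cur := by
      intro k hk1 hk2
      rcases Nat.lt_or_ge k idx with hlt | hge
      · exact hS.2.1 k hk1 (by omega)
      · exact hE.2.2.1 k hge hk2
    have := bloop_spec states idx hidx cur rfl s0 e0 hS.1 hE.1 hE.2.1 hall hS.2.2
      hE.2.2.2 0 1 (le_refl 1) (by omega) (by omega) (by omega)
      (by intro k hk1 hk2; omega) (Or.inl rfl)
    rw [← hidxval, this]
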